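-- pv_equiv track=rewrite | github.com/KanemeDev/MineScanner | main.py | expand_iprange
-- ===== SOURCE A (Python) =====
-- def expand_iprange(iprange: str):
--     iprange = iprange.strip()
--     parts = iprange.split('.')
--     if len(parts) != 4:
--         return [iprange]
--
--     octet_values = []
--     for p in parts:
--         p = p.strip()
--         if p == '*':
--             octet_values.append(range(256))
--         else:
--             octet_values.append([int(p) if p.isdigit() else p])
--
--     ips = []
--     for a in octet_values[0]:
--         for b in octet_values[1]:
--             for c in octet_values[2]:
--                 for d in octet_values[3]:
--                     ips.append(f"{a}.{b}.{c}.{d}")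
--
--     return ips
-- ===== SOURCE B (Python) =====
-- def _octet_strings(p):
--     p = p.strip()
--     if p == '*':
--         return [str(i) for i in range(256)]
--     if p.isdigit():
--         return [str(int(p))]
--     return [p]
--
-- def expand_iprange(iprange: str):
--     iprange = iprange.strip()
--     parts = iprange.split('.')
--     if len(parts) != 4:
--         return [iprange]
--     groups = [_octet_strings(p) for p in parts]
--     acc = groups[0]
--     for g in groups[1:]:
--         acc = [pfx + '.' + v for pfx in acc for v in g]
--     return acc
-- ===== Notes on version B (the rewrite author's own statement) =====
-- stated objective: alternative
-- what changed: Replaces the four hard-coded nested loops over int-or-string octet groups by converting each octet group to strings once and folding a growing accumulator of prefixes with a cartesian-product step over the group list.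
import Mathlib
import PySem

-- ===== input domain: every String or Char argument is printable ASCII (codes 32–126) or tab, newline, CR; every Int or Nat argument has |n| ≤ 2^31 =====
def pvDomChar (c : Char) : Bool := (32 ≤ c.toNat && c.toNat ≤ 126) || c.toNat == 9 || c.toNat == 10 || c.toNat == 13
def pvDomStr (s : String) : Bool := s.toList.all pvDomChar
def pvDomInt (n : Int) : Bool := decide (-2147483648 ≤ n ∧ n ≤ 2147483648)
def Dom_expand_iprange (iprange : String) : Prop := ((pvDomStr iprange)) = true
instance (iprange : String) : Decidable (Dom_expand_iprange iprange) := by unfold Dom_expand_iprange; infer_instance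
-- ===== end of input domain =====

-- B replaces A's four hard-coded nested loops by a per-octet string-group conversion
-- and a cartesian-product fold over the group list (objective: alternative decomposition).

-- ===== PORT A =====
-- A keeps each octet group as range(256) (ints) or a one-element list holding an int or
-- the raw string; the f-string formats either.  We model the element type as Int ⊕ String.
def pvFmt (v : Sum Int String) : String :=
  match v with
  | Sum.inl n => PySem.Int.toStr n
  | Sum.inr s => s

def expand_iprange (iprange : String) : List String :=
  let s := PySem.Str.strip iprange
  let parts := (PySem.Str.split? s ".").getD []   -- sep "." ≠ "", so split? is never none
  if parts.length ≠ 4 then [s]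
  else
    let octet_values : List (List (Sum Int String)) :=
      parts.foldl (fun acc p =>
        if PySem.Str.strip p = "*" then acc ++ [(PySem.List.pyRange 0 256 1).map Sum.inl]
        else acc ++ [[if PySem.Str.strIsdigit (PySem.Str.strip p) then
                        -- int(p): isdigit guarantees int() succeeds, so getD 0 is never the default
                        Sum.inl ((PySem.Int.ofStr? (PySem.Str.strip p)).getD 0)
                      else Sum.inr (PySem.Str.strip p)]]) []
    -- octet_values[i]: the list has exactly 4 elements here, so getD [] is never the default
    let ov0 := (PySem.List.pyGet? octet_values 0).getD []
    let ov1 := (PySem.List.pyGet? octet_values 1).getD []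
    let ov2 := (PySem.List.pyGet? octet_values 2).getD []
    let ov3 := (PySem.List.pyGet? octet_values 3).getD []
    ov0.foldl (fun ips a =>
      ov1.foldl (fun ips b =>
        ov2.foldl (fun ips c =>
          ov3.foldl (fun ips d =>
            ips ++ [pvFmt a ++ "." ++ pvFmt b ++ "." ++ pvFmt c ++ "." ++ pvFmt d]) ips) ips) ips) []

-- ===== PORT B =====
def pvOctetStrings (p : String) : List String :=
  if PySem.Str.strip p = "*" then (PySem.List.pyRange 0 256 1).map PySem.Int.toStr
  else if PySem.Str.strIsdigit (PySem.Str.strip p) then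
    [PySem.Int.toStr ((PySem.Int.ofStr? (PySem.Str.strip p)).getD 0)]
  else [PySem.Str.strip p]

def expand_iprange_alt (iprange : String) : List String :=
  let s := PySem.Str.strip iprange
  let parts := (PySem.Str.split? s ".").getD []   -- sep "." ≠ "", so split? is never none
  if parts.length ≠ 4 then [s]
  else
    let groups := parts.map pvOctetStrings
    let acc := (PySem.List.pyGet? groups 0).getD []   -- groups has 4 elements here
    (PySem.List.slice groups (some 1) none).foldl
      (fun acc g => acc.flatMap (fun pfx => g.map (fun v => pfx ++ "." ++ v))) acc

-- ===== PRECONDITION & SPEC =====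
def Spec_expand_iprange (iprange : String) (out : List String) : Prop := out = expand_iprange_alt iprange
instance (iprange : String) (out : List String) : Decidable (Spec_expand_iprange iprange out) := by unfold Spec_expand_iprange; infer_instance

-- ===== CLAIM (what is proved, stated in full; the proofs are below) =====
def Claim_equal_expand_iprange : Prop := ∀ (iprange : String), Dom_expand_iprange iprange → Spec_expand_iprange iprange (expand_iprange iprange)

-- ===== LEMMAS AND PROOFS =====

-- A's octet group (ints/strings), as built by one iteration of A's parsing loop
def pvGroupA (p : String) : List (Sum Int String) :=
  if PySem.Str.strip p = "*" then (PySem.List.pyRange 0 256 1).map Sum.inl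
  else [if PySem.Str.strIsdigit (PySem.Str.strip p) then
          Sum.inl ((PySem.Int.ofStr? (PySem.Str.strip p)).getD 0)
        else Sum.inr (PySem.Str.strip p)]

theorem pvOctetStrings_eq_map_fmt (p : String) : pvOctetStrings p = (pvGroupA p).map pvFmt := by
  unfold pvOctetStrings pvGroupA
  split_ifs with h1 h2 <;> simp [pvFmt, List.map_map, Function.comp]

theorem pvBodyA_eq (acc : List (List (Sum Int String))) (p : String) :
    (if PySem.Str.strip p = "*" then acc ++ [(PySem.List.pyRange 0 256 1).map Sum.inl]
     else acc ++ [[if PySem.Str.strIsdigit (PySem.Str.strip p) then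
                     Sum.inl ((PySem.Int.ofStr? (PySem.Str.strip p)).getD 0)
                   else Sum.inr (PySem.Str.strip p)]])
    = acc ++ [pvGroupA p] := by
  unfold pvGroupA; split_ifs <;> rfl

theorem pvGet4_0 {A : Type} (a b c d : List A) : (PySem.List.pyGet? [a, b, c, d] 0).getD [] = a := rfl
theorem pvGet4_1 {A : Type} (a b c d : List A) : (PySem.List.pyGet? [a, b, c, d] 1).getD [] = b := rfl
theorem pvGet4_2 {A : Type} (a b c d : List A) : (PySem.List.pyGet? [a, b, c, d] 2).getD [] = c := rfl
theorem pvGet4_3 {A : Type} (a b c d : List A) : (PySem.List.pyGet? [a, b, c, d] 3).getD [] = d := rfl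
theorem pvSlice4 {A : Type} (a b c d : List A) : PySem.List.slice [a, b, c, d] (some 1) none = [b, c, d] := rfl

theorem pvCore (G0 G1 G2 G3 : List (Sum Int String)) :
    G0.foldl (fun ips a =>
      G1.foldl (fun ips b =>
        G2.foldl (fun ips c =>
          G3.foldl (fun ips d =>
            ips ++ [pvFmt a ++ "." ++ pvFmt b ++ "." ++ pvFmt c ++ "." ++ pvFmt d]) ips) ips) ips) []
    = ((((G0.map pvFmt).flatMap fun pfx => (G1.map pvFmt).map fun v => pfx ++ "." ++ v).flatMap
          fun pfx => (G2.map pvFmt).map fun v => pfx ++ "." ++ v).flatMap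
          fun pfx => (G3.map pvFmt).map fun v => pfx ++ "." ++ v) := by
  simp only [PySem.List.foldl_append_singleton_eq_map, PySem.List.foldl_append_eq_flatMap,
    List.nil_append, List.flatMap_assoc, List.flatMap_map, List.map_map]
  simp only [Function.comp_def]

set_option maxHeartbeats 1000000 in
theorem expand_iprange_spec_aux (iprange : String) :
    expand_iprange iprange = expand_iprange_alt iprange := by
  unfold expand_iprange expand_iprange_alt
  by_cases hlen : ((PySem.Str.split? (PySem.Str.strip iprange) ".").getD []).length = 4
  case neg => simp only [hlen, ne_eq, not_false_iff, if_true]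
  case pos =>
    obtain ⟨p0, p1, p2, p3, hparts⟩ :
        ∃ p0 p1 p2 p3, (PySem.Str.split? (PySem.Str.strip iprange) ".").getD [] = [p0, p1, p2, p3] := by
      match h : (PySem.Str.split? (PySem.Str.strip iprange) ".").getD [] with
      | [a, b, c, d] => exact ⟨a, b, c, d, rfl⟩
      | [] | [_] | [_, _] | [_, _, _] => rw [h] at hlen; simp at hlen
      | a :: b :: c :: d :: e :: l => rw [h] at hlen; simp at hlen
    simp only [hparts, List.length_cons, List.length_nil, Nat.reduceAdd,
      (by decide : ¬(4 ≠ 4)), if_false]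
    simp only [List.foldl_cons, List.foldl_nil, pvBodyA_eq, List.nil_append, List.cons_append,
      List.map_cons, List.map_nil]
    rw [pvGet4_0, pvGet4_1, pvGet4_2, pvGet4_3, pvGet4_0, pvSlice4]
    simp only [List.foldl_cons, List.foldl_nil]
    rw [pvOctetStrings_eq_map_fmt, pvOctetStrings_eq_map_fmt,
        pvOctetStrings_eq_map_fmt, pvOctetStrings_eq_map_fmt]
    exact pvCore (pvGroupA p0) (pvGroupA p1) (pvGroupA p2) (pvGroupA p3)

-- ===== VERDICT (by name: the statement is the Claim_ definition above) =====
theorem expand_iprange_spec : Claim_equal_expand_iprange := by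
  intro iprange _hdom
  unfold Spec_expand_iprange
  exact expand_iprange_spec_aux iprange
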